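-- pv_equiv track=rewrite | github.com/seareale/AGC2021_object-detection | train/custom/agcF1score.py | print_countObjNum
-- ===== SOURCE A (Python) =====
-- def print_countObjNum(result_dict, label):
--     count = {}
--     max_num = 0
--     for k0, v0 in result_dict.items():
--         for k1, v1 in v0.items():
--             if k1 == label :
--                 if v1 not in count.keys():
--                     count[v1] = 1
--                 else :
--                     count[v1] += 1
--                 if max_num < v1:
--                     max_num = v1
--     count = dict(sorted(count.items()))
--
--     return count
-- ===== SOURCE B (Python) =====
-- from itertools import groupby
--
-- def print_countObjNum(result_dict, label):
--     vals = sorted(v1 for v0 in result_dict.values()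
--                   for k1, v1 in v0.items() if k1 == label)
--     return {k: len(list(g)) for k, g in groupby(vals)}
-- ===== Notes on version B (the rewrite author's own statement) =====
-- stated objective: alternative
-- what changed: A counts matching values into a dict inside the nested loop and then sorts the dict items; B gathers the matching values into a flat list, sorts it once, and counts consecutive runs (itertools.groupby) in a single ordered pass.
import Mathlib
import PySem

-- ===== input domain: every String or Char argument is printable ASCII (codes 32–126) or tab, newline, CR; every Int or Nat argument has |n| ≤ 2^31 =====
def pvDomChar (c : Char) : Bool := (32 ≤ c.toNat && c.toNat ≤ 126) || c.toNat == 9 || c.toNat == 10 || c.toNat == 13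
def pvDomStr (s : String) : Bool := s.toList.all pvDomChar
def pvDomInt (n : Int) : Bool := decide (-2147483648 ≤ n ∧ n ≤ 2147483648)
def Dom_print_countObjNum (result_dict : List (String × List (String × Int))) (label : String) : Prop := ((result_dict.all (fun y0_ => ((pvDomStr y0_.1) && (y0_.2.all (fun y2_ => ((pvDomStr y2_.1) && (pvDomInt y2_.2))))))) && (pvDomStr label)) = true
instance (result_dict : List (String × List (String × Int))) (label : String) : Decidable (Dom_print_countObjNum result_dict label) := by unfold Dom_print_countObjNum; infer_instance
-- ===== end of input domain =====

-- B replaces A's "count into a dict, then sort the items" by "gather the matching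
-- values, sort them once, then count consecutive runs in a single ordered pass"
-- (objective: alternative decomposition, same asymptotic cost).

-- ===== PORT A =====
-- literal port of A: nested loop building a counter dict (and an unused max_num),
-- then sorted(count.items()) — tuple sort, ported with sorted2 on (fst, snd).
def print_countObjNum (result_dict : List (String × List (String × Int))) (label : String) : List (Int × Int) :=
  let st :=
    result_dict.foldl (fun (st : PySem.Dict Int Int × Int) kv =>
      kv.2.foldl (fun (st : PySem.Dict Int Int × Int) p =>
        if p.1 == label then
          let count :=
            if st.1.contains p.2 = false then st.1.insert p.2 1
            else st.1.insert p.2 (st.1.getD p.2 0 + 1)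
          (count, if st.2 < p.2 then p.2 else st.2)
        else st) st)
      (PySem.Dict.empty, 0)
  PySem.List.sorted2 st.1.items (fun p => p.1) (fun p => p.2)

-- ===== PORT B =====
-- the matching values, in source order (the generator in Source B)
def pvGather (result_dict : List (String × List (String × Int))) (label : String) : List Int :=
  result_dict.flatMap (fun kv => (kv.2.filter (fun p => p.1 == label)).map (fun p => p.2))

-- itertools.groupby on a list + len of each group, emitted as (key, run length)
def pvGroup : List Int → List (Int × Int)
  | [] => []
  | x :: xs =>
      (x, 1 + ((xs.takeWhile (· == x)).length : Int)) :: pvGroup (xs.dropWhile (· == x))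
  termination_by l => l.length
  decreasing_by
    simp only [List.length_cons]
    exact Nat.lt_succ_of_le ((List.dropWhile_sublist _).length_le)

def print_countObjNum_alt (result_dict : List (String × List (String × Int))) (label : String) : List (Int × Int) :=
  pvGroup (PySem.List.sorted (pvGather result_dict label) (fun x => x))

-- ===== PRECONDITION & SPEC =====
def Spec_print_countObjNum (result_dict : List (String × List (String × Int))) (label : String) (out : List (Int × Int)) : Prop := out = print_countObjNum_alt result_dict label
instance (result_dict : List (String × List (String × Int))) (label : String) (out : List (Int × Int)) : Decidable (Spec_print_countObjNum result_dict label out) := by unfold Spec_print_countObjNum; infer_instance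

-- ===== CLAIM (what is proved, stated in full; the proofs are below) =====
def Claim_equal_print_countObjNum : Prop := ∀ (result_dict : List (String × List (String × Int))) (label : String), Dom_print_countObjNum result_dict label → Spec_print_countObjNum result_dict label (print_countObjNum result_dict label)

-- ===== LEMMAS AND PROOFS =====

theorem pv_getD_of_contains_false {κ ν : Type} [BEq κ] (d : PySem.Dict κ ν) (k : κ) (dflt : ν)
    (h : d.contains k = false) : d.getD k dflt = dflt := by
  have h2 : (d.get? k).isSome = false := by rw [← PySem.Dict.contains_eq_isSome_get?]; exact h
  have h3 : d.get? k = none := Option.not_isSome_iff_eq_none.mp (by simp [h2])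
  rw [PySem.Dict.getD, h3]
  rfl

-- A's branchy counter update is the uniform insert-getD-add-one update
theorem pv_step_eq {κ : Type} [BEq κ] (d : PySem.Dict κ Int) (v : κ) :
    (if d.contains v = false then d.insert v 1 else d.insert v (d.getD v 0 + 1)) =
      d.insert v (d.getD v 0 + 1) := by
  by_cases h : d.contains v = false
  · rw [if_pos h, pv_getD_of_contains_false d v 0 h]; norm_num
  · rw [if_neg h]

-- the inner loop of A, projected to its dict component
theorem pv_inner (label : String) (v0 : List (String × Int)) :
    ∀ (d : PySem.Dict Int Int) (m : Int),
      (v0.foldl (fun (st : PySem.Dict Int Int × Int) p =>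
        if p.1 == label then
          ((if st.1.contains p.2 = false then st.1.insert p.2 1
            else st.1.insert p.2 (st.1.getD p.2 0 + 1)),
           if st.2 < p.2 then p.2 else st.2)
        else st) (d, m)).1 =
      ((v0.filter (fun p => p.1 == label)).map (fun p => p.2)).foldl
        (fun d x => d.insert x (d.getD x 0 + 1)) d := by
  induction v0 with
  | nil => intro d m; rfl
  | cons p t ih =>
      intro d m
      by_cases h : (p.1 == label) = true
      · simp only [List.foldl_cons, List.filter_cons, h]
        rw [pv_step_eq]
        exact ih _ _
      · simp only [List.foldl_cons, List.filter_cons, h]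
        exact ih d m

-- the whole nested loop builds Counter(gathered values)
theorem pv_outer (label : String) (rd : List (String × List (String × Int))) :
    ∀ (d : PySem.Dict Int Int) (m : Int),
      (rd.foldl (fun (st : PySem.Dict Int Int × Int) kv =>
        kv.2.foldl (fun (st : PySem.Dict Int Int × Int) p =>
          if p.1 == label then
            ((if st.1.contains p.2 = false then st.1.insert p.2 1
              else st.1.insert p.2 (st.1.getD p.2 0 + 1)),
             if st.2 < p.2 then p.2 else st.2)
          else st) st) (d, m)).1 =
      (pvGather rd label).foldl (fun d x => d.insert x (d.getD x 0 + 1)) d := by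
  induction rd with
  | nil => intro d m; rfl
  | cons kv t ih =>
      intro d m
      simp only [List.foldl_cons, pvGather, List.flatMap_cons, List.foldl_append]
      rw [← pv_inner label kv.2 d m]
      have h2 := ih (kv.2.foldl (fun (st : PySem.Dict Int Int × Int) p =>
          if p.1 == label then
            ((if st.1.contains p.2 = false then st.1.insert p.2 1
              else st.1.insert p.2 (st.1.getD p.2 0 + 1)),
             if st.2 < p.2 then p.2 else st.2)
          else st) (d, m)).1
        (kv.2.foldl (fun (st : PySem.Dict Int Int × Int) p =>
          if p.1 == label then
            ((if st.1.contains p.2 = false then st.1.insert p.2 1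
              else st.1.insert p.2 (st.1.getD p.2 0 + 1)),
             if st.2 < p.2 then p.2 else st.2)
          else st) (d, m)).2
      simpa [pvGather] using h2

-- insertBy with sorted2's lexicographic test = insertBy with the fst-only test,
-- when the new element's key clashes with no key in the accumulator
theorem pv_insertBy_congr {α κ₁ κ₂ : Type} [LinearOrder κ₁] [LinearOrder κ₂]
    (k1 : α → κ₁) (k2 : α → κ₂) (x : α) (acc : List α)
    (h : ∀ a ∈ acc, k1 a ≠ k1 x) :
    PySem.List.insertBy (fun a b => decide (k1 a < k1 b) || !decide (k1 b < k1 a) && decide (k2 a < k2 b)) x acc =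
      PySem.List.insertBy (fun a b => decide (k1 a < k1 b)) x acc := by
  induction acc with
  | nil => rfl
  | cons y ys ih =>
      have hne : k1 y ≠ k1 x := h y (by simp)
      have hcase : (decide (k1 x < k1 y) || !decide (k1 y < k1 x) && decide (k2 x < k2 y)) =
          decide (k1 x < k1 y) := by
        rcases lt_or_gt_of_ne hne.symm with hlt | hgt
        · simp [hlt, not_lt_of_gt hlt]
        · simp [hgt, not_lt_of_gt hgt]
      simp only [PySem.List.insertBy, hcase]
      split
      · rfl
      · rw [ih (fun a ha => h a (by simp [ha]))]

theorem pv_foldl_insertBy_congr {α κ₁ κ₂ : Type} [LinearOrder κ₁] [LinearOrder κ₂]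
    (k1 : α → κ₁) (k2 : α → κ₂) :
    ∀ (xs acc : List α), (xs.map k1).Nodup →
      (∀ a ∈ acc, ∀ x ∈ xs, k1 a ≠ k1 x) →
      xs.foldl (fun acc x => PySem.List.insertBy (fun a b => decide (k1 a < k1 b) || !decide (k1 b < k1 a) && decide (k2 a < k2 b)) x acc) acc =
      xs.foldl (fun acc x => PySem.List.insertBy (fun a b => decide (k1 a < k1 b)) x acc) acc := by
  intro xs
  induction xs with
  | nil => intro acc _ _; rfl
  | cons x t ih =>
      intro acc hnd hacc
      simp only [List.map_cons, List.nodup_cons] at hnd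
      simp only [List.foldl_cons]
      rw [pv_insertBy_congr k1 k2 x acc (fun a ha => hacc a ha x (by simp))]
      refine ih _ hnd.2 ?_
      intro a ha y hy
      rcases (PySem.List.mem_insertBy _ x a acc).mp ha with rfl | ha'
      · exact fun he => hnd.1 (he ▸ List.mem_map_of_mem hy)
      · exact hacc a ha' y (List.mem_cons_of_mem _ hy)

-- sorted2 collapses to sorted-by-first-key on a list with pairwise-distinct keys
theorem pv_sorted2_eq_sorted {α κ₁ κ₂ : Type} [LinearOrder κ₁] [LinearOrder κ₂]
    (xs : List α) (k1 : α → κ₁) (k2 : α → κ₂) (hnd : (xs.map k1).Nodup) :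
    PySem.List.sorted2 xs k1 k2 = PySem.List.sorted xs k1 := by
  simp only [PySem.List.sorted2, PySem.List.sorted, if_neg (by decide : ¬ (false = true))]
  exact pv_foldl_insertBy_congr k1 k2 xs [] hnd (by simp)

-- PySem.Set.ofList is a sublist of its input
theorem pv_foldl_add_sublist {α : Type} [BEq α] :
    ∀ (l acc : List α), (l.foldl PySem.Set.add acc).Sublist (acc ++ l) := by
  intro l
  induction l with
  | nil => intro acc; simp
  | cons x t ih =>
      intro acc
      simp only [List.foldl_cons, PySem.Set.add]
      split
      · exact (ih acc).trans ((List.append_sublist_append_left acc).mpr (List.sublist_cons_self x t))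
      · exact (ih (acc ++ [x])).trans (by simp)

theorem pv_ofList_sublist {α : Type} [BEq α] (l : List α) :
    (PySem.Set.ofList l).Sublist l := by
  simpa using pv_foldl_add_sublist l []

theorem pv_ofList_pairwise_lt {α : Type} [BEq α] [LawfulBEq α] [LinearOrder α]
    (l : List α) (h : l.Pairwise (· ≤ ·)) :
    (PySem.Set.ofList l).Pairwise (· < ·) := by
  have h1 : (PySem.Set.ofList l).Pairwise (· ≤ ·) := h.sublist (pv_ofList_sublist l)
  have h2 : (PySem.Set.ofList l).Pairwise (· ≠ ·) := PySem.Set.nodup_ofList l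
  exact (h1.and h2).imp (fun hp => lt_of_le_of_ne hp.1 hp.2)

-- skipped adds: folding elements equal to an already-present x changes nothing
theorem pv_foldl_add_all_eq {α : Type} [BEq α] [LawfulBEq α] (x : α) :
    ∀ (l : List α) (acc : PySem.Set α), (∀ e ∈ l, e = x) → acc.contains x = true →
      l.foldl PySem.Set.add acc = acc := by
  intro l
  induction l with
  | nil => intro acc _ _; rfl
  | cons e t ih =>
      intro acc hall hc
      have he : e = x := hall e (by simp)
      simp only [List.foldl_cons, PySem.Set.add, he, hc, if_pos]
      exact ih acc (fun a ha => hall a (by simp [ha])) hc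

theorem pv_foldl_add_cons {α : Type} [BEq α] [LawfulBEq α] (x : α) :
    ∀ (l : List α) (s : PySem.Set α), x ∉ l →
      l.foldl PySem.Set.add (x :: s) = x :: l.foldl PySem.Set.add s := by
  intro l
  induction l with
  | nil => intro s _; rfl
  | cons e t ih =>
      intro s hx
      have hne : (e == x) = false := by
        simp only [beq_eq_false_iff_ne]; exact fun he => hx (by simp [he.symm])
      by_cases hc : List.contains s e = true
      · simp only [List.foldl_cons, PySem.Set.add, PySem.Set.contains, List.contains_cons, hne, hc]
        exact ih s (fun h => hx (List.mem_cons_of_mem _ h))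
      · simp only [List.foldl_cons, PySem.Set.add, PySem.Set.contains, List.contains_cons, hne, hc]
        rw [show (x :: s) ++ [e] = x :: (s ++ [e]) from rfl]
        exact ih (s ++ [e]) (fun h => hx (List.mem_cons_of_mem _ h))

theorem pv_dropWhile_head {α : Type} (p : α → Bool) :
    ∀ (xs : List α) (y : α) (r : List α), xs.dropWhile p = y :: r → p y = false := by
  intro xs
  induction xs with
  | nil => intro y r h; simp at h
  | cons a t ih =>
      intro y r h
      rw [List.dropWhile_cons] at h
      by_cases hp : p a = true
      · exact ih y r (by rwa [if_pos hp] at h)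
      · rw [if_neg hp] at h
        cases h
        simpa using hp

-- every element after the first run is strictly larger than the head
theorem pv_drop_lt (x : Int) (xs : List Int) (h : (x :: xs).Pairwise (· ≤ ·)) :
    ∀ z ∈ xs.dropWhile (· == x), x < z := by
  rcases hr : xs.dropWhile (· == x) with _ | ⟨y, r'⟩
  · intro z hz; simp at hz
  · have hy : (y == x) = false := pv_dropWhile_head _ xs y r' hr
    have hyx : y ≠ x := by simpa using hy
    have hsub : (y :: r').Sublist xs := hr ▸ List.dropWhile_sublist _
    have hxle : ∀ z ∈ xs, x ≤ z := by
      intro z hz; exact (List.pairwise_cons.mp h).1 z hz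
    have hxy : x < y := lt_of_le_of_ne (hxle y (hsub.mem (by simp))) (Ne.symm hyx)
    have hpr : (y :: r').Pairwise (· ≤ ·) :=
      ((List.pairwise_cons.mp h).2).sublist hsub
    intro z hz
    rcases List.mem_cons.mp hz with rfl | hz'
    · exact hxy
    · exact lt_of_lt_of_le hxy ((List.pairwise_cons.mp hpr).1 z hz')

-- run/group characterisation of pvGroup on a weakly sorted list
theorem pv_group_eq_aux : ∀ (n : Nat) (l : List Int), l.length ≤ n → l.Pairwise (· ≤ ·) →
    pvGroup l = (PySem.Set.ofList l).map (fun k => (k, (l.count k : Int))) := by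
  intro n
  induction n with
  | zero =>
      intro l hl _
      have : l = [] := List.length_eq_zero_iff.mp (Nat.le_zero.mp hl)
      subst this; rw [pvGroup]; rfl
  | succ n ih =>
      intro l hl hp
      cases l with
      | nil => rw [pvGroup]; rfl
      | cons x xs =>
          have htd := List.takeWhile_append_dropWhile (p := (· == x)) (l := xs)
          have hteq : ∀ e ∈ xs.takeWhile (· == x), e = x := by
            intro e he
            have := List.mem_takeWhile_imp he
            simpa using this
          have hlt := pv_drop_lt x xs hp
          have hxr : x ∉ xs.dropWhile (· == x) := fun hx => lt_irrefl x (hlt x hx)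
          -- ofList (x :: xs) = x :: ofList (dropWhile ...)
          have hof : PySem.Set.ofList (x :: xs) =
              x :: PySem.Set.ofList (xs.dropWhile (· == x)) := by
            show List.foldl PySem.Set.add (PySem.Set.add PySem.Set.empty x) xs = _
            have h1 : PySem.Set.add PySem.Set.empty x = [x] := rfl
            rw [h1]
            conv_lhs => rw [← htd]
            rw [List.foldl_append,
              pv_foldl_add_all_eq x _ [x] hteq (by simp [PySem.Set.contains]),
              pv_foldl_add_cons x _ [] hxr]
            rfl
          -- counts
          have hct : (xs.takeWhile (· == x)).count x = (xs.takeWhile (· == x)).length := by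
            apply List.count_eq_length.mpr
            intro e he; exact ((hteq e he) ▸ rfl)
          have hcxs : xs.count x = (xs.takeWhile (· == x)).length := by
            conv_lhs => rw [← htd]
            rw [List.count_append, hct, List.count_eq_zero.mpr hxr]
            omega
          have hcx : (x :: xs).count x =
              1 + (xs.takeWhile (· == x)).length := by
            rw [List.count_cons_self, hcxs]; omega
          have hr : (xs.dropWhile (· == x)).length ≤ n := by
            have := (List.dropWhile_sublist (l := xs) (· == x)).length_le
            have hlen : xs.length ≤ n := by simpa using Nat.succ_le_succ_iff.mp hl
            omega
          have hpr : (xs.dropWhile (· == x)).Pairwise (· ≤ ·) :=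
            ((List.pairwise_cons.mp hp).2).sublist (List.dropWhile_sublist _)
          have hrec := ih (xs.dropWhile (· == x)) hr hpr
          rw [pvGroup, hof, List.map_cons, hrec, hcx,
            show (((1 + (xs.takeWhile (· == x)).length : Nat)) : Int) =
                1 + ((xs.takeWhile (· == x)).length : Int) by push_cast; ring]
          congr 1
          apply List.map_congr_left
          intro k hk
          have hkr : k ∈ xs.dropWhile (· == x) := (PySem.Set.mem_ofList _ k).mp hk
          have hkx : x < k := hlt k hkr
          have hckxs : xs.count k = (xs.dropWhile (· == x)).count k := by
            conv_lhs => rw [← htd]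
            rw [List.count_append, List.count_eq_zero.mpr
              (fun hkt => absurd (hteq k hkt) (ne_of_gt hkx))]
            omega
          have hck : (x :: xs).count k = (xs.dropWhile (· == x)).count k := by
            rw [List.count_cons_of_ne hkx.ne, hckxs]
          rw [hck]

theorem pv_group_eq (l : List Int) (h : l.Pairwise (· ≤ ·)) :
    pvGroup l = (PySem.Set.ofList l).map (fun k => (k, (l.count k : Int))) :=
  pv_group_eq_aux l.length l le_rfl h

-- ===== VERDICT (by name: the statement is the Claim_ definition above) =====
theorem print_countObjNum_spec : Claim_equal_print_countObjNum := by
  intro rd label _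
  show PySem.List.sorted2
      ((rd.foldl (fun (st : PySem.Dict Int Int × Int) kv =>
        kv.2.foldl (fun (st : PySem.Dict Int Int × Int) p =>
          if p.1 == label then
            ((if st.1.contains p.2 = false then st.1.insert p.2 1
              else st.1.insert p.2 (st.1.getD p.2 0 + 1)),
             if st.2 < p.2 then p.2 else st.2)
          else st) st) (PySem.Dict.empty, 0)).1.items)
      (fun p => p.1) (fun p => p.2) =
    pvGroup (PySem.List.sorted (pvGather rd label) (fun x => x))
  rw [pv_outer label rd PySem.Dict.empty 0,
    PySem.Dict.foldl_insert_getD_add_one_eq_counter, PySem.Dict.items_counter]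
  have hnd : (((PySem.Set.ofList (pvGather rd label)).map
      (fun k => (k, (List.count k (pvGather rd label) : Int)))).map (fun p => p.1)).Nodup := by
    rw [List.map_map]
    have hid : ((fun (p : Int × Int) => p.1) ∘
        fun k => (k, (List.count k (pvGather rd label) : Int))) = id := rfl
    rw [hid, List.map_id]
    exact PySem.Set.nodup_ofList _
  rw [pv_sorted2_eq_sorted _ _ _ hnd,
    pv_group_eq _ (PySem.List.sorted_pairwise (pvGather rd label) (fun x => x))]
  have hcnt : ∀ k, (PySem.List.sorted (pvGather rd label) (fun x => x)).count k =
      (pvGather rd label).count k := fun k =>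
    (PySem.List.sorted_perm (pvGather rd label) (fun x => x) false).count_eq k
  have hmapeq : (PySem.Set.ofList (PySem.List.sorted (pvGather rd label) (fun x => x))).map
        (fun k => (k, ((PySem.List.sorted (pvGather rd label) (fun x => x)).count k : Int))) =
      (PySem.Set.ofList (PySem.List.sorted (pvGather rd label) (fun x => x))).map
        (fun k => (k, ((pvGather rd label).count k : Int))) := by
    apply List.map_congr_left; intro k _; rw [hcnt k]
  rw [hmapeq]
  apply PySem.List.sorted_eq_of_perm_of_pairwise_lt
  · apply List.Perm.map
    apply (List.perm_ext_iff_of_nodup (PySem.Set.nodup_ofList _) (PySem.Set.nodup_ofList _)).mpr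
    intro a
    rw [PySem.Set.mem_ofList, PySem.Set.mem_ofList, PySem.List.mem_sorted]
  · apply List.Pairwise.map
    · intro a b hab
      exact hab
    · exact pv_ofList_pairwise_lt _ (PySem.List.sorted_pairwise (pvGather rd label) (fun x => x))
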